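-- pv_equiv track=rewrite | github.com/cabaleirog/coding-challenges | leet_code/find_anagram_mappings.py | get_mapping_contest
-- ===== SOURCE A (Python) =====
-- def get_mapping_contest(a, b):
--     """Return an index mapping from the first list to the second one.
--
--     Iterates over every value in `a`, searching for the same value on `b`, once
--     found, records the index where it was found and removes the value from `b`,
--     so the next time it looks for the same value, it will skip that index. This
--     implementation has lots of room for improvement.
--     """
--     mapping = []
--     aux_b = b[:]
--     for value in a:
--         for idx, other in enumerate(aux_b):
--             if value == other:
--                 mapping.append(idx)
--                 aux_b[idx] = None
--                 break
--     return mapping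
-- ===== SOURCE B (Python) =====
-- def get_mapping_contest(a, b):
--     """Return an index mapping from the first list to the second one.
--
--     Builds once a dict from value to its (sorted) list of indices in `b`;
--     each value of `a` then consumes the next unused index of that value via
--     a per-value cursor, in O(1) per element.  Values of `a` with no unused
--     index left in `b` are skipped, as in the scanning implementation.
--     """
--     positions = {}
--     for idx, value in enumerate(b):
--         positions.setdefault(value, []).append(idx)
--     next_slot = {}
--     mapping = []
--     for value in a:
--         lst = positions.get(value, [])
--         s = next_slot.get(value, 0)
--         if s < len(lst):
--             mapping.append(lst[s])
--             next_slot[value] = s + 1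
--     return mapping
-- ===== Notes on version B (the rewrite author's own statement) =====
-- stated objective: faster
-- what changed: Replaced the per-element linear rescan of a mutated copy of b by a value->list-of-indices dict built once, with a per-value cursor consuming the next unused index in O(1).
import Mathlib
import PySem

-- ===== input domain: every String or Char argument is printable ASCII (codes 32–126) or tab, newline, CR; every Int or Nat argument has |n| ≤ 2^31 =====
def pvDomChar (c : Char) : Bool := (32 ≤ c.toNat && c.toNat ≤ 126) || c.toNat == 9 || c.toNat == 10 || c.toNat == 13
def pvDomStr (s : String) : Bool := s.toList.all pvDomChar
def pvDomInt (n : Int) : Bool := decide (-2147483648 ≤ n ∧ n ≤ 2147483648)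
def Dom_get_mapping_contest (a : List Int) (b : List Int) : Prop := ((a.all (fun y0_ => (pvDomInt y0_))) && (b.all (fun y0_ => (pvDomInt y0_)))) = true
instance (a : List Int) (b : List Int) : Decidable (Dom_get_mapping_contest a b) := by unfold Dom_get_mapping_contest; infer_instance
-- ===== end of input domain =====

-- B replaces A's per-element linear rescan of a mutated copy of b by a value→indices
-- dict built once plus a per-value cursor (objective: faster, asymptotic).

-- ===== PORT A =====
-- inner 'for idx, other in enumerate(aux_b): if value == other: … break' scan
def pvFindIdx (v : Int) : List (Option Int) → Nat → Option Nat
  | [], _ => none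
  | o :: rest, i => if o = some v then some i else pvFindIdx v rest (i + 1)

def get_mapping_contest (a : List Int) (b : List Int) : List Int :=
  -- aux_b holds b's values, cells becoming None once consumed
  (a.foldl (fun st value =>
      match pvFindIdx value st.2 0 with
      | some idx => (st.1 ++ [(idx : Int)], st.2.set idx none)
      | none => st)
    (([] : List Int), b.map some)).1

-- ===== PORT B =====
-- 'for idx, value in enumerate(b): positions.setdefault(value, []).append(idx)'
def pvBuild : List Int → Nat → PySem.Dict Int (List Int) → PySem.Dict Int (List Int)
  | [], _, d => d
  | v :: rest, i, d => pvBuild rest (i + 1) (d.insert v (d.getD v [] ++ [(i : Int)]))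

def get_mapping_contest_alt (a : List Int) (b : List Int) : List Int :=
  let positions := pvBuild b 0 PySem.Dict.empty
  (a.foldl (fun st value =>
      let lst := positions.getD value []
      let s := st.2.getD value 0   -- next_slot cursor; always a nonnegative int, kept as Nat
      if s < lst.length then (st.1 ++ [lst.getD s 0], st.2.insert value (s + 1))
      else st)
    (([] : List Int), (PySem.Dict.empty : PySem.Dict Int Nat))).1

-- ===== PRECONDITION & SPEC =====
def Spec_get_mapping_contest (a : List Int) (b : List Int) (out : List Int) : Prop := out = get_mapping_contest_alt a b
instance (a : List Int) (b : List Int) (out : List Int) : Decidable (Spec_get_mapping_contest a b out) := by unfold Spec_get_mapping_contest; infer_instance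

-- ===== CLAIM (what is proved, stated in full; the proofs are below) =====
def Claim_equal_get_mapping_contest : Prop := ∀ (a : List Int) (b : List Int), Dom_get_mapping_contest a b → Spec_get_mapping_contest a b (get_mapping_contest a b)

-- ===== LEMMAS AND PROOFS =====

-- indices (ascending) of the cells of l that hold value v (helper for the proofs)
def pvOcc (v : Int) : List (Option Int) → List Nat
  | [] => []
  | o :: rest => if o = some v then 0 :: (pvOcc v rest).map (· + 1) else (pvOcc v rest).map (· + 1)

theorem pvOcc_cons_self (v : Int) (l : List (Option Int)) :
    pvOcc v (some v :: l) = 0 :: (pvOcc v l).map (· + 1) := by simp [pvOcc]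

theorem pvOcc_cons_ne {o : Option Int} {v : Int} (h : o ≠ some v) (l : List (Option Int)) :
    pvOcc v (o :: l) = (pvOcc v l).map (· + 1) := by simp [pvOcc, h]

theorem pvFindIdx_eq_head (v : Int) (l : List (Option Int)) :
    ∀ k, pvFindIdx v l k = (pvOcc v l).head?.map (· + k) := by
  induction l with
  | nil => intro k; rfl
  | cons o rest ih =>
    intro k
    by_cases h : o = some v
    · simp [pvFindIdx, pvOcc, h]
    · simp only [pvFindIdx, pvOcc, if_neg h, ih (k + 1), List.head?_map]
      cases (pvOcc v rest).head? with
      | none => rfl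
      | some x => simp [Option.map]; omega

theorem pvOcc_set (v : Int) (l : List (Option Int)) :
    ∀ i t, pvOcc v l = i :: t →
      pvOcc v (l.set i none) = t ∧ ∀ w, w ≠ v → pvOcc w (l.set i none) = pvOcc w l := by
  induction l with
  | nil => intro i t h; simp [pvOcc] at h
  | cons o rest ih =>
    intro i t h
    by_cases hv : o = some v
    · simp only [pvOcc, if_pos hv] at h
      obtain ⟨hi, ht⟩ := List.cons.inj h
      subst hi
      constructor
      · simp [pvOcc, ← ht]
      · intro w hw
        have : o ≠ some w := by simp [hv]; exact fun e => (hw e.symm).elim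
        simp [pvOcc, this]
    · simp only [pvOcc, if_neg hv] at h
      cases hrest : pvOcc v rest with
      | nil => rw [hrest] at h; simp at h
      | cons i' t' =>
        rw [hrest] at h
        simp only [List.map_cons] at h
        obtain ⟨hi, ht⟩ := List.cons.inj h
        obtain ⟨h1, h2⟩ := ih i' t' hrest
        subst hi
        constructor
        · simp [List.set, pvOcc, if_neg hv, h1, ← ht]
        · intro w hw
          by_cases hw' : o = some w
          · simp [List.set, pvOcc, if_pos hw', h2 w hw]
          · simp [List.set, pvOcc, if_neg hw', h2 w hw]

theorem pvBuild_getD (l : List Int) :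
    ∀ (i : Nat) (d : PySem.Dict Int (List Int)) (v : Int),
      (pvBuild l i d).getD v [] =
        d.getD v [] ++ (pvOcc v (l.map some)).map (fun k => ((k + i : Nat) : Int)) := by
  induction l with
  | nil => intro i d v; simp [pvBuild, pvOcc]
  | cons x rest ih =>
    intro i d v
    simp only [pvBuild, ih (i + 1)]
    rw [PySem.Dict.getD_insert]
    by_cases hv : v = x
    · subst hv
      rw [if_pos rfl, List.map_cons, pvOcc_cons_self, List.map_cons, List.map_map,
        List.append_assoc, List.singleton_append]
      congr 1
      congr 1
      · norm_num
      · apply List.map_congr_left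
        intro k _; simp only [Function.comp_apply]; push_cast; ring
    · have hne : (some x : Option Int) ≠ some v := fun e => hv (Option.some.inj e).symm
      rw [List.map_cons, pvOcc_cons_ne hne, if_neg hv, List.map_map]
      congr 1
      apply List.map_congr_left
      intro k _; simp only [Function.comp_apply]; push_cast; ring

-- the loop invariant tying A's mutated aux_b to B's (positions, next_slot) state
def pvInv (aux : List (Option Int)) (st : PySem.Dict Int Nat)
    (pos : PySem.Dict Int (List Int)) : Prop :=
  ∀ v, (pos.getD v []).drop (st.getD v 0) = (pvOcc v aux).map (fun k : Nat => (k : Int))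

theorem pv_loop (pos : PySem.Dict Int (List Int)) (a : List Int) :
    ∀ (aux : List (Option Int)) (st : PySem.Dict Int Nat) (acc : List Int),
      pvInv aux st pos →
      (a.foldl (fun st' value =>
          match pvFindIdx value st'.2 0 with
          | some idx => (st'.1 ++ [(idx : Int)], st'.2.set idx none)
          | none => st') (acc, aux)).1 =
      (a.foldl (fun st' value =>
          let lst := pos.getD value []
          let s := st'.2.getD value 0
          if s < lst.length then (st'.1 ++ [lst.getD s 0], st'.2.insert value (s + 1))
          else st') (acc, st)).1 := by
  induction a with
  | nil => intro aux st acc _; rfl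
  | cons v rest ih =>
    intro aux st acc hinv
    have hfind := pvFindIdx_eq_head v aux 0
    cases hocc : pvOcc v aux with
    | nil =>
      rw [hocc] at hfind
      have hdrop := hinv v
      rw [hocc] at hdrop
      have hlen : (pos.getD v []).length ≤ st.getD v 0 := by
        by_contra hlt
        have := congrArg List.length hdrop
        simp [List.length_drop] at this
        omega
      simp only [List.foldl_cons]
      rw [hfind]
      simp only [List.head?_nil, Option.map_none]
      have : ¬ st.getD v 0 < (pos.getD v []).length := by omega
      simp only [this, if_false]
      exact ih aux st acc hinv
    | cons i t =>
      rw [hocc] at hfind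
      have hdrop := hinv v
      rw [hocc] at hdrop
      simp only [List.map_cons] at hdrop
      have hlt : st.getD v 0 < (pos.getD v []).length := by
        by_contra hle
        rw [List.drop_eq_nil_of_le (by omega)] at hdrop
        simp at hdrop
      have hget : (pos.getD v []).getD (st.getD v 0) 0 = (i : Int) := by
        have h1 : ((pos.getD v []).drop (st.getD v 0)).head? = some (i : Int) := by
          rw [hdrop]; rfl
        rw [List.head?_drop] at h1
        rw [List.getD_eq_getElem?_getD, h1]; rfl
      obtain ⟨hset, hother⟩ := pvOcc_set v aux i t hocc
      simp only [List.foldl_cons]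
      rw [hfind]
      simp only [List.head?_cons, Option.map_some]
      simp only [hlt, if_true]
      have harg : i + 0 = i := by omega
      rw [harg, hget]
      apply ih
      -- invariant is preserved
      intro w
      by_cases hw : w = v
      · subst hw
        rw [PySem.Dict.getD_insert, if_pos rfl, hset]
        have : (pos.getD w []).drop (st.getD w 0 + 1) =
            ((pos.getD w []).drop (st.getD w 0)).drop 1 := by
          rw [List.drop_drop]
        rw [this, hdrop]
        rfl
      · rw [PySem.Dict.getD_insert, if_neg hw, hother w hw]
        exact hinv w

theorem pvInv_init (b : List Int) :
    pvInv (b.map some) PySem.Dict.empty (pvBuild b 0 PySem.Dict.empty) := by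
  intro v
  rw [pvBuild_getD]
  simp only [PySem.Dict.getD_empty, List.nil_append, List.drop_zero]
  apply List.map_congr_left
  intro k _; norm_num

-- ===== VERDICT (by name: the statement is the Claim_ definition above) =====
theorem get_mapping_contest_spec : Claim_equal_get_mapping_contest := by
  intro a b _
  unfold Spec_get_mapping_contest get_mapping_contest get_mapping_contest_alt
  exact pv_loop (pvBuild b 0 PySem.Dict.empty) a (b.map some) PySem.Dict.empty [] (pvInv_init b)
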